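-- pv_equiv track=rewrite | github.com/YaoJianyu77/dailypaper | scripts/publish_daily.py | daily_mix_lines
-- ===== SOURCE A (Python) =====
-- from collections import Counter
-- from typing import Any, Callable, Dict, List
--
-- def selection_lane(paper: Dict[str, Any]) -> str:
--     lane = str(paper.get('selection_lane') or paper.get('source_lane') or '').strip().lower()
--     if lane in {'fresh', 'established', 'classic'}:
--         return lane
--     return 'fresh'
--
-- def daily_mix_lines(papers: List[Dict[str, Any]]) -> List[str]:
--     counts = Counter(selection_lane(paper) for paper in papers)
--     lines: List[str] = []
--     if counts.get('fresh'):
--         lines.append(f'- Fresh systems papers: {counts["fresh"]}')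
--     if counts.get('established'):
--         lines.append(f'- Established papers: {counts["established"]}')
--     if counts.get('classic'):
--         lines.append(f'- Classic revisit papers: {counts["classic"]}')
--     return lines
-- ===== SOURCE B (Python) =====
-- def selection_lane(paper):
--     lane = str(paper.get('selection_lane') or paper.get('source_lane') or '').strip().lower()
--     if lane in {'fresh', 'established', 'classic'}:
--         return lane
--     return 'fresh'
--
-- LANES = [
--     ('fresh', '- Fresh systems papers: '),
--     ('established', '- Established papers: '),
--     ('classic', '- Classic revisit papers: '),
-- ]
--
-- def daily_mix_lines(papers):
--     lines = []
--     for key, prefix in LANES: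
--         count = sum(1 for p in papers if selection_lane(p) == key)
--         if count:
--             lines.append(prefix + str(count))
--     return lines
-- ===== Notes on version B (the rewrite author's own statement) =====
-- stated objective: simpler
-- what changed: Replaces the Counter index plus three hand-written if/append blocks by a fixed (lane, label) table driven by one loop that rescans the papers per lane with a conditional sum.
import Mathlib
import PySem

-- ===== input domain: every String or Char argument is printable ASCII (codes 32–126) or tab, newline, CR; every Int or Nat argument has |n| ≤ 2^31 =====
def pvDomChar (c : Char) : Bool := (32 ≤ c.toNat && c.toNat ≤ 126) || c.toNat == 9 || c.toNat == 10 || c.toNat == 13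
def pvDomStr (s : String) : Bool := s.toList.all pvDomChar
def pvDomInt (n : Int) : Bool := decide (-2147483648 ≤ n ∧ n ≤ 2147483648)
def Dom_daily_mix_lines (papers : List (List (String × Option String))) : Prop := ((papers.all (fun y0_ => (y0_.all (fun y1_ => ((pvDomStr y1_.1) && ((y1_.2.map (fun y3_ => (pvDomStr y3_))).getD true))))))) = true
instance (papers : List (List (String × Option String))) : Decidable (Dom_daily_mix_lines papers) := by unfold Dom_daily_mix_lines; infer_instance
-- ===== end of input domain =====

-- B replaces A's Counter index and three hand-written if/append blocks by a fixed (lane, label)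
-- table driven by one loop that rescans the papers per lane (objective: simpler).

-- ===== PORT A =====
-- shared helper (identical in A and in B): dict.get k → first match in the association list, None if absent
def pvDictGet (d : List (String × Option String)) (k : String) : Option String :=
  match d.find? (fun kv => kv.1 == k) with
  | some kv => kv.2
  | none => none

-- `a or b or ''` on Optional[str]: first truthy (non-None, non-empty) value, else ''
def selection_lane (paper : List (String × Option String)) : String :=
  let raw : String :=
    match pvDictGet paper "selection_lane" with
    | some s =>
      if s ≠ "" then s
      else match pvDictGet paper "source_lane" with
           | some t => if t ≠ "" then t else ""
           | none => ""
    | none =>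
      match pvDictGet paper "source_lane" with
      | some t => if t ≠ "" then t else ""
      | none => ""
  let lane := PySem.Str.lower (PySem.Str.strip raw)
  if lane == "fresh" || lane == "established" || lane == "classic" then lane else "fresh"

def daily_mix_lines (papers : List (List (String × Option String))) : List String :=
  let counts : PySem.Dict String Int := PySem.Dict.counter (papers.map (fun p => selection_lane p))
  let lines : List String := []
  -- `if counts.get(k):` — truthy iff present and nonzero; counts[k] read only under that guard
  let lines :=
    match PySem.Dict.get? counts "fresh" with
    | some n => if n ≠ 0 then lines ++ ["- Fresh systems papers: " ++ PySem.Int.toStr n] else lines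
    | none => lines
  let lines :=
    match PySem.Dict.get? counts "established" with
    | some n => if n ≠ 0 then lines ++ ["- Established papers: " ++ PySem.Int.toStr n] else lines
    | none => lines
  let lines :=
    match PySem.Dict.get? counts "classic" with
    | some n => if n ≠ 0 then lines ++ ["- Classic revisit papers: " ++ PySem.Int.toStr n] else lines
    | none => lines
  lines

-- ===== PORT B =====
def pvLanes : List (String × String) :=
  [("fresh", "- Fresh systems papers: "),
   ("established", "- Established papers: "),
   ("classic", "- Classic revisit papers: ")]

def daily_mix_lines_alt (papers : List (List (String × Option String))) : List String :=
  pvLanes.foldl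
    (fun lines kv =>
      let count : Int := papers.foldl (fun n p => if selection_lane p == kv.1 then n + 1 else n) 0
      if count ≠ 0 then lines ++ [kv.2 ++ PySem.Int.toStr count] else lines)
    []

-- ===== PRECONDITION & SPEC =====
def Spec_daily_mix_lines (papers : List (List (String × Option String))) (out : List String) : Prop := out = daily_mix_lines_alt papers
instance (papers : List (List (String × Option String))) (out : List String) : Decidable (Spec_daily_mix_lines papers out) := by unfold Spec_daily_mix_lines; infer_instance

-- ===== CLAIM (what is proved, stated in full; the proofs are below) =====
def Claim_equal_daily_mix_lines : Prop := ∀ (papers : List (List (String × Option String))), Dom_daily_mix_lines papers → Spec_daily_mix_lines papers (daily_mix_lines papers)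

-- ===== LEMMAS AND PROOFS =====

-- get? of any Dict in terms of contains and getD
theorem dict_get?_eq (d : PySem.Dict String Int) (k : String) :
    PySem.Dict.get? d k = if d.contains k then some (d.getD k 0) else none := by
  cases h : PySem.Dict.get? d k
  · have := (PySem.Dict.get?_eq_none_iff_contains d k).mp h
    simp [this]
  · have hc : d.contains k = true := by
      by_contra hc
      simp at hc
      rw [← PySem.Dict.get?_eq_none_iff_contains] at hc
      simp [hc] at h
    simp [hc, PySem.Dict.getD, h]

-- the Counter's get? in terms of the plain occurrence count
theorem counter_get?_eq (xs : List String) (k : String) :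
    PySem.Dict.get? (PySem.Dict.counter xs) k =
      if xs.count k = 0 then none else some (xs.count k : Int) := by
  rw [dict_get?_eq, PySem.Dict.contains_counter, PySem.Dict.getD_counter]
  rcases Nat.eq_zero_or_pos (xs.count k) with h | h
  · simp [h, List.count_eq_zero.mp h]
  · have : k ∈ xs := List.count_pos_iff.mp h
    simp [this, Nat.pos_iff_ne_zero.mp h]

-- B's inner scan computes the same count as the Counter stores
theorem alt_count_eq (papers : List (List (String × Option String))) (k : String) :
    papers.foldl (fun n p => if selection_lane p == k then n + 1 else n) (0 : Int) =
      ((papers.map (fun p => selection_lane p)).count k : Int) := by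
  rw [PySem.List.foldl_if_add_one]
  simp [List.count, List.countP_map, Function.comp_def, BEq.comm]

-- ===== VERDICT (by name: the statement is the Claim_ definition above) =====
theorem daily_mix_lines_spec : Claim_equal_daily_mix_lines := by
  intro papers _
  unfold Spec_daily_mix_lines daily_mix_lines daily_mix_lines_alt pvLanes
  simp only [List.foldl_cons, List.foldl_nil, counter_get?_eq, alt_count_eq]
  by_cases h1 : (papers.map (fun p => selection_lane p)).count "fresh" = 0 <;>
    by_cases h2 : (papers.map (fun p => selection_lane p)).count "established" = 0 <;>
      by_cases h3 : (papers.map (fun p => selection_lane p)).count "classic" = 0 <;>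
        simp [h1, h2, h3]
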